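-- pv_equiv track=rewrite | github.com/Ishamyyl/code_samples | code_fights/interview_practice/hash_tables/groupingDishes.py | tvGroupingDishes
-- ===== SOURCE A (Python) =====
-- def tvGroupingDishes(dishes):
--     groups = {}
--     for d, *v in dishes:
--         for x in v:
--             groups.setdefault(x, []).append(d)
--     ans = []
--     for x in sorted(groups):
--         if len(groups[x]) >= 2:
--             ans.append([x] + sorted(groups[x]))
--     return ans
-- ===== SOURCE B (Python) =====
-- def tvGroupingDishes(dishes):
--     # flatten to (ingredient, dish) pairs, sort once, then group consecutive runs
--     pairs = sorted((x, dish[0]) for dish in dishes for x in dish[1:])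
--     ans = []
--     run = []  # current run: [ingredient, dish1, dish2, ...]
--     for x, d in pairs:
--         if run and run[0] == x:
--             run.append(d)
--         else:
--             if len(run) >= 3:
--                 ans.append(run)
--             run = [x, d]
--     if len(run) >= 3:
--         ans.append(run)
--     return ans
-- ===== Notes on version B (the rewrite author's own statement) =====
-- stated objective: alternative
-- what changed: Replaces A's dict-of-lists grouping with per-group sorts by flattening to (ingredient, dish) pairs, sorting that list once, and grouping consecutive runs in a single pass.
import Mathlib
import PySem

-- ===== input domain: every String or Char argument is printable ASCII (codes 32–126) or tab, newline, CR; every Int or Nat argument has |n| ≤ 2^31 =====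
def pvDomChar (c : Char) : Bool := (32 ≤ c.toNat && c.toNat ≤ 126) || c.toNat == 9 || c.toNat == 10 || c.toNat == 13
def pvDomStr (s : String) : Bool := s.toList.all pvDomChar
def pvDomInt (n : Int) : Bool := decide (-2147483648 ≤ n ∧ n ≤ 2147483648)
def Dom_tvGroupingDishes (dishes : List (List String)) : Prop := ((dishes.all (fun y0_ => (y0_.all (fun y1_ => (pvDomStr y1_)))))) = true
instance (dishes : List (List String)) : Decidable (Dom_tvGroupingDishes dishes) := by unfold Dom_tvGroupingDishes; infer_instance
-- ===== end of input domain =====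

-- B replaces A's dict-of-lists grouping (plus one sort per group) by flattening to
-- (ingredient, dish) pairs, sorting that flat list once and grouping consecutive runs.

-- ===== PORT A =====
def tvGroupingDishes (dishes : List (List String)) : List (List String) :=
  -- groups = {}; for d, *v in dishes: for x in v: groups.setdefault(x, []).append(d)
  let groups := dishes.foldl (fun g l =>
    match l with
    | [] => g   -- unreachable under Pre_: Python's 'd, *v = []' raises ValueError here
    | d :: v => v.foldl (fun g x => g.modify x [] (fun ds => ds ++ [d])) g) PySem.Dict.empty
  -- ans = []; for x in sorted(groups): if len(groups[x]) >= 2: ans.append([x] + sorted(groups[x]))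
  (PySem.List.sorted groups.keys (fun x => x)).foldl
    (fun ans x => if 2 ≤ (groups.getD x []).length
      then ans ++ [[x] ++ PySem.List.sorted (groups.getD x []) (fun y => y)]
      else ans) []

-- ===== PORT B =====
-- pairs: (x, dish[0]) for dish in dishes for x in dish[1:] — an empty dish yields no
-- pairs (dish[0] is only evaluated when dish[1:] is nonempty), exactly the match below.
def pvRawPairs (dishes : List (List String)) : List (String × String) :=
  dishes.flatMap (fun dish => match dish with
    | [] => []
    | d :: v => v.map (fun x => (x, d)))

-- loop body: if run and run[0] == x: run.append(d)
--            else: (if len(run) >= 3: ans.append(run)); run = [x, d]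
def pvStep (st : List String × List (List String)) (p : String × String) :
    List String × List (List String) :=
  if (match st.1 with | r0 :: _ => p.1 == r0 | [] => false)
  then (st.1 ++ [p.2], st.2)
  else ([p.1, p.2], if 3 ≤ st.1.length then st.2 ++ [st.1] else st.2)

def tvGroupingDishes_alt (dishes : List (List String)) : List (List String) :=
  let pairs := PySem.List.sorted2 (pvRawPairs dishes) (fun p => p.1) (fun p => p.2)
  let st := pairs.foldl pvStep ([], [])
  if 3 ≤ st.1.length then st.2 ++ [st.1] else st.2

-- ===== PRECONDITION & SPEC =====
-- Pre_ excludes exactly the inputs where A raises: a dish given as an empty list makes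
-- Python's 'for d, *v in dishes' unpacking raise ValueError.
def Pre_tvGroupingDishes (dishes : List (List String)) : Prop := ∀ l ∈ dishes, l ≠ []
instance (dishes : List (List String)) : Decidable (Pre_tvGroupingDishes dishes) := by
  unfold Pre_tvGroupingDishes; infer_instance

def pvWitness_tvGroupingDishes : List (List String) := [["a", "b"], ["c", "b"]]

def Spec_tvGroupingDishes (dishes : List (List String)) (out : List (List String)) : Prop :=
  out = tvGroupingDishes_alt dishes
instance (dishes : List (List String)) (out : List (List String)) :
    Decidable (Spec_tvGroupingDishes dishes out) := by unfold Spec_tvGroupingDishes; infer_instance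

-- ===== CLAIM (what is proved, stated in full; the proofs are below) =====
def Claim_equal_tvGroupingDishes : Prop := ∀ (dishes : List (List String)),
  Dom_tvGroupingDishes dishes → Pre_tvGroupingDishes dishes →
  Spec_tvGroupingDishes dishes (tvGroupingDishes dishes)

-- ===== LEMMAS AND PROOFS =====

-- proof-only abbreviations
def pvDishesOf (ps : List (String × String)) (x : String) : List String :=
  (ps.filter (fun p => p.1 == x)).map (fun p => p.2)
def pvKeys (ps : List (String × String)) : List String :=
  PySem.List.sorted (PySem.Set.ofList (ps.map (fun p => p.1))) (fun x => x)
def pvGroup (ps : List (String × String)) (k : String) : List String :=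
  PySem.List.sorted (pvDishesOf ps k) (fun y => y)
def pvFlatOf (ks : List String) (g : String → List String) : List (String × String) :=
  ks.flatMap (fun k => (g k).map (fun d => (k, d)))
def pvFlat (ps : List (String × String)) : List (String × String) :=
  pvFlatOf (pvKeys ps) (pvGroup ps)
def pvLexLe (p q : String × String) : Prop := p.1 < q.1 ∨ (p.1 = q.1 ∧ p.2 ≤ q.2)
def pvBefore (a b : String × String) : Bool :=
  decide (a.1 < b.1) || !decide (b.1 < a.1) && decide (a.2 < b.2)

lemma pvLexLe_trans {a b c : String × String} (h1 : pvLexLe a b) (h2 : pvLexLe b c) :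
    pvLexLe a c := by
  unfold pvLexLe at *
  rcases h1 with h1 | ⟨h1, h1'⟩ <;> rcases h2 with h2 | ⟨h2, h2'⟩
  · exact Or.inl (lt_trans h1 h2)
  · exact Or.inl (h2 ▸ h1)
  · exact Or.inl (h1 ▸ h2)
  · exact Or.inr ⟨h1.trans h2, le_trans h1' h2'⟩

lemma pvLexLe_antisymm {a b : String × String} (h1 : pvLexLe a b) (h2 : pvLexLe b a) :
    a = b := by
  unfold pvLexLe at *
  rcases h1 with h1 | ⟨h1, h1'⟩ <;> rcases h2 with h2 | ⟨h2, h2'⟩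
  · exact absurd (lt_trans h1 h2) (lt_irrefl _)
  · exact absurd h1 (h2 ▸ lt_irrefl _)
  · exact absurd h2 (h1 ▸ lt_irrefl _)
  · exact Prod.ext h1 (le_antisymm h1' h2')

lemma pvBefore_true {a b : String × String} (h : pvBefore a b = true) : pvLexLe a b := by
  unfold pvBefore at h
  unfold pvLexLe
  have h' : a.1 < b.1 ∨ (¬ b.1 < a.1 ∧ a.2 < b.2) := by
    simpa only [Bool.or_eq_true, Bool.and_eq_true, Bool.not_eq_true', decide_eq_true_eq,
      decide_eq_false_iff_not] using h
  rcases h' with h' | ⟨hba, h2⟩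
  · exact Or.inl h'
  · by_cases hab : a.1 < b.1
    · exact Or.inl hab
    · exact Or.inr ⟨le_antisymm (not_lt.mp hba) (not_lt.mp hab), le_of_lt h2⟩

lemma pvBefore_false {a b : String × String} (h : pvBefore a b = false) : pvLexLe b a := by
  unfold pvBefore at h
  unfold pvLexLe
  rcases Bool.or_eq_false_iff.mp h with ⟨h1, h2⟩
  have hab : ¬ a.1 < b.1 := of_decide_eq_false h1
  by_cases hba : b.1 < a.1
  · exact Or.inl hba
  · have hd : (!decide (b.1 < a.1)) = true := by
      simp [hba]
    rcases Bool.and_eq_false_iff.mp h2 with h3 | h3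
    · rw [hd] at h3
      exact Bool.noConfusion h3
    · exact Or.inr ⟨le_antisymm (not_lt.mp hab) (not_lt.mp hba),
        not_lt.mp (of_decide_eq_false h3)⟩

lemma pairwise_insertBy {α : Type} {r : α → α → Prop}
    (htr : ∀ a b c, r a b → r b c → r a c) {before : α → α → Bool}
    (h1 : ∀ a b, before a b = true → r a b) (h2 : ∀ a b, before a b = false → r b a)
    (x : α) : ∀ (ys : List α), ys.Pairwise r → (PySem.List.insertBy before x ys).Pairwise r := by
  intro ys
  induction ys with
  | nil => intro _; simp [PySem.List.insertBy]
  | cons y ys ih =>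
    intro hp
    rcases List.pairwise_cons.mp hp with ⟨hy, hys⟩
    show (if before x y then x :: y :: ys else y :: PySem.List.insertBy before x ys).Pairwise r
    split
    · rename_i hb
      refine List.pairwise_cons.mpr ⟨?_, hp⟩
      intro z hz
      rcases List.mem_cons.mp hz with rfl | hz
      · exact h1 _ _ hb
      · exact htr _ _ _ (h1 _ _ hb) (hy z hz)
    · rename_i hb
      refine List.pairwise_cons.mpr ⟨?_, ih hys⟩
      intro z hz
      rcases (PySem.List.mem_insertBy before x z ys).mp hz with rfl | hz
      · exact h2 _ _ (Bool.eq_false_iff.mpr hb)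
      · exact hy z hz

lemma pairwise_foldl_insertBy {α : Type} {r : α → α → Prop}
    (htr : ∀ a b c, r a b → r b c → r a c) {before : α → α → Bool}
    (h1 : ∀ a b, before a b = true → r a b) (h2 : ∀ a b, before a b = false → r b a) :
    ∀ (xs acc : List α), acc.Pairwise r →
      (xs.foldl (fun a x => PySem.List.insertBy before x a) acc).Pairwise r := by
  intro xs
  induction xs with
  | nil => intro acc h; simpa using h
  | cons x xs ih =>
    intro acc h
    simpa using ih _ (pairwise_insertBy htr h1 h2 x acc h)

lemma sorted2_eq_foldl (xs : List (String × String)) :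
    PySem.List.sorted2 xs (fun p => p.1) (fun p => p.2) =
      xs.foldl (fun acc x => PySem.List.insertBy pvBefore x acc) [] := rfl

lemma sorted2_pairwise_lex (xs : List (String × String)) :
    (PySem.List.sorted2 xs (fun p => p.1) (fun p => p.2)).Pairwise pvLexLe := by
  rw [sorted2_eq_foldl]
  exact pairwise_foldl_insertBy (r := pvLexLe) (before := pvBefore)
    (fun _ _ _ h1 h2 => pvLexLe_trans h1 h2) (fun _ _ h => pvBefore_true h)
    (fun _ _ h => pvBefore_false h) xs [] List.Pairwise.nil

lemma flatMap_perm {α β : Type} (ks : List α) (f g : α → List β)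
    (h : ∀ k ∈ ks, (f k).Perm (g k)) : (ks.flatMap f).Perm (ks.flatMap g) := by
  induction ks with
  | nil => simp
  | cons k ks ih =>
    simp only [List.flatMap_cons]
    exact (h k List.mem_cons_self).append
      (ih (fun k' hk' => h k' (List.mem_cons_of_mem _ hk')))

lemma perm_flatMap_filter (ks : List String) :
    ∀ (ps : List (String × String)), ks.Nodup → (∀ p ∈ ps, p.1 ∈ ks) →
      (ks.flatMap (fun k => ps.filter (fun p => p.1 == k))).Perm ps := by
  induction ks with
  | nil =>
    intro ps _ hcov
    have : ps = [] := by
      cases ps with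
      | nil => rfl
      | cons p ps => exact absurd (hcov p List.mem_cons_self) (by simp)
    simp [this]
  | cons k ks ih =>
    intro ps hnd hcov
    simp only [List.flatMap_cons]
    have hflat : ks.flatMap (fun k' => ps.filter (fun p => p.1 == k')) =
        ks.flatMap (fun k' => (ps.filter (fun p => !(p.1 == k))).filter (fun p => p.1 == k')) := by
      apply List.flatMap_congr
      intro k' hk'
      rw [List.filter_filter]
      refine (List.filter_congr ?_).symm
      intro p _
      by_cases hpk : p.1 = k'
      · have hkk : k' ≠ k := fun h => (List.nodup_cons.mp hnd).1 (h ▸ hk')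
        simp [hpk, hkk]
      · simp [hpk]
    rw [hflat]
    have hperm := ih (ps.filter (fun p => !(p.1 == k))) (List.nodup_cons.mp hnd).2 ?cov
    case cov =>
      intro p hp
      have hmem := List.mem_of_mem_filter hp
      have hne : ¬ (p.1 == k) = true := by
        have := List.of_mem_filter hp; simpa using this
      rcases List.mem_cons.mp (hcov p hmem) with h | h
      · exact absurd (by simp [h]) hne
      · exact h
    exact List.Perm.trans (List.Perm.append_left _ hperm)
      (List.filter_append_perm (fun p => p.1 == k) ps)

lemma pvKeys_pairwise_lt (ps : List (String × String)) : (pvKeys ps).Pairwise (· < ·) :=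
  PySem.List.sorted_ofList_pairwise_lt _

lemma pvKeys_nodup (ps : List (String × String)) : (pvKeys ps).Nodup :=
  (pvKeys_pairwise_lt ps).imp (fun h => ne_of_lt h)

lemma mem_pvKeys {ps : List (String × String)} {p : String × String} (hp : p ∈ ps) :
    p.1 ∈ pvKeys ps := by
  unfold pvKeys
  rw [PySem.List.mem_sorted, PySem.Set.mem_ofList]
  exact List.mem_map.mpr ⟨p, hp, rfl⟩

lemma group_map_eq_filter (ps : List (String × String)) (k : String) :
    ((pvDishesOf ps k).map (fun d => (k, d))) = ps.filter (fun p => p.1 == k) := by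
  unfold pvDishesOf
  rw [List.map_map]
  have h : ∀ p ∈ ps.filter (fun p => p.1 == k),
      ((fun d => (k, d)) ∘ (fun p : String × String => p.2)) p = p := by
    intro p hp
    have hpk : p.1 = k := by simpa using List.of_mem_filter hp
    simp [← hpk]
  rw [List.map_congr_left h]
  simp

lemma pvFlat_perm (ps : List (String × String)) : (pvFlat ps).Perm ps := by
  have h1 : (pvFlat ps).Perm ((pvKeys ps).flatMap (fun k => ps.filter (fun p => p.1 == k))) := by
    unfold pvFlat pvFlatOf
    apply flatMap_perm
    intro k _
    refine List.Perm.trans ?_ (List.Perm.of_eq (group_map_eq_filter ps k))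
    exact List.Perm.map _ (by unfold pvGroup; exact PySem.List.sorted_perm _ _ _)
  exact h1.trans (perm_flatMap_filter (pvKeys ps) ps (pvKeys_nodup ps) (fun p hp => mem_pvKeys hp))

lemma pvFlatOf_pairwise (ks : List String) (g : String → List String)
    (hks : ks.Pairwise (· < ·)) (hg : ∀ k, (g k).Pairwise (· ≤ ·)) :
    (pvFlatOf ks g).Pairwise pvLexLe := by
  induction ks with
  | nil => simp [pvFlatOf]
  | cons k ks ih =>
    rcases List.pairwise_cons.mp hks with ⟨hk, hks'⟩
    unfold pvFlatOf
    rw [List.flatMap_cons, List.pairwise_append]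
    refine ⟨?_, ih hks', ?_⟩
    · rw [List.pairwise_map]
      exact (hg k).imp (fun h => Or.inr ⟨rfl, h⟩)
    · intro a ha b hb
      rcases List.mem_map.mp ha with ⟨d, _, rfl⟩
      rcases List.mem_flatMap.mp hb with ⟨k', hk', hbk'⟩
      rcases List.mem_map.mp hbk' with ⟨d', _, rfl⟩
      exact Or.inl (hk k' hk')

lemma pvFlat_eq_sorted2 (ps : List (String × String)) :
    PySem.List.sorted2 ps (fun p => p.1) (fun p => p.2) = pvFlat ps := by
  refine List.Perm.eq_of_pairwise ?_ (sorted2_pairwise_lex ps)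
    (pvFlatOf_pairwise _ _ (pvKeys_pairwise_lt ps) (fun k => PySem.List.sorted_pairwise _ _))
    ((PySem.List.sorted2_perm ps _ _ false).trans (pvFlat_perm ps).symm)
  intro a b _ _ h1 h2
  exact pvLexLe_antisymm h1 h2

-- ===== A-side =====
lemma pvRawPairs_cons (d : String) (v : List String) (rest : List (List String)) :
    pvRawPairs ((d :: v) :: rest) = v.map (fun x => (x, d)) ++ pvRawPairs rest := by
  simp [pvRawPairs]

lemma A_groups_eq : ∀ (dishes : List (List String)) (g : PySem.Dict String (List String)),
    (∀ l ∈ dishes, l ≠ []) →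
    dishes.foldl (fun g l =>
      match l with
      | [] => g
      | d :: v => v.foldl (fun g x => g.modify x [] (fun ds => ds ++ [d])) g) g
    = (pvRawPairs dishes).foldl (fun g p => g.modify p.1 [] (fun ds => ds ++ [p.2])) g := by
  intro dishes
  induction dishes with
  | nil => intro g _; rfl
  | cons l rest ih =>
    intro g h
    match l with
    | [] => exact absurd rfl (h [] List.mem_cons_self)
    | d :: v =>
      rw [pvRawPairs_cons, List.foldl_append, List.foldl_map, List.foldl_cons]
      exact ih _ (fun l hl => h l (List.mem_cons_of_mem _ hl))

lemma A_eq (dishes : List (List String)) (h : ∀ l ∈ dishes, l ≠ []) :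
    tvGroupingDishes dishes =
      ((pvKeys (pvRawPairs dishes)).filter
          (fun x => decide (2 ≤ (pvDishesOf (pvRawPairs dishes) x).length))).map
        (fun x => [x] ++ pvGroup (pvRawPairs dishes) x) := by
  unfold tvGroupingDishes
  rw [A_groups_eq dishes _ h]
  have hgetD : ∀ x, ((pvRawPairs dishes).foldl
      (fun g p => g.modify p.1 [] (fun ds => ds ++ [p.2])) PySem.Dict.empty).getD x [] =
      pvDishesOf (pvRawPairs dishes) x := by
    intro x
    rw [PySem.Dict.getD_foldl_modify_append]
    simp [pvDishesOf]
  have hkeys : ((pvRawPairs dishes).foldl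
      (fun g p => g.modify p.1 [] (fun ds => ds ++ [p.2])) PySem.Dict.empty).keys =
      PySem.Set.ofList ((pvRawPairs dishes).map (fun p => p.1)) := by
    rw [PySem.Dict.keys_foldl_modify_key (pvRawPairs dishes) (fun p => p.1) []
      (fun _ p => (fun ds => ds ++ [p.2]))]
    simp [PySem.Set.update, PySem.Set.ofList_eq_foldl, PySem.Dict.keys_empty]
  simp only [hgetD, hkeys]
  rw [PySem.List.foldl_append_ite
    (p := fun x => 2 ≤ (pvDishesOf (pvRawPairs dishes) x).length)
    (f := fun x => [x] ++ PySem.List.sorted (pvDishesOf (pvRawPairs dishes) x) (fun y => y))]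
  simp only [List.nil_append]
  unfold pvKeys pvGroup
  rfl

-- ===== B-side =====
def pvFinish (st : List String × List (List String)) : List (List String) :=
  if 3 ≤ st.1.length then st.2 ++ [st.1] else st.2

lemma run_extend (x : String) : ∀ (ds2 run : List String) (ans : List (List String)),
    run.head? = some x →
    (ds2.map (fun d => (x, d))).foldl pvStep (run, ans) = (run ++ ds2, ans) := by
  intro ds2
  induction ds2 with
  | nil => intro run ans _; simp
  | cons d ds ih =>
    intro run ans hr
    match run, hr with
    | r0 :: rs, hr =>
      have hr0 : r0 = x := by simpa using hr
      subst hr0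
      simp only [List.map_cons, List.foldl_cons]
      have hstep : pvStep (r0 :: rs, ans) (r0, d) = (r0 :: rs ++ [d], ans) := by
        simp [pvStep]
      rw [hstep, ih (r0 :: rs ++ [d]) ans (by simp)]
      simp

lemma runScan : ∀ (ks : List String) (g : String → List String),
    ks.Pairwise (· < ·) → (∀ k ∈ ks, g k ≠ []) →
    ∀ (run : List String) (ans : List (List String)),
    (∀ k ∈ ks, (match run with | r0 :: _ => (k == r0) | [] => false) = false) →
    pvFinish ((ks.flatMap (fun k => (g k).map (fun d => (k, d)))).foldl pvStep (run, ans))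
    = (if 3 ≤ run.length then ans ++ [run] else ans) ++
        (ks.map (fun k => k :: g k)).filter (fun l => decide (3 ≤ l.length)) := by
  intro ks
  induction ks with
  | nil => intro g _ _ run ans _; simp [pvFinish]
  | cons k ks ih =>
    intro g hks hg run ans hr
    match hgk : g k with
    | [] => exact absurd hgk (hg k List.mem_cons_self)
    | d :: ds =>
      rw [List.flatMap_cons, hgk, List.map_cons, List.foldl_append, List.foldl_cons]
      have hstep : pvStep (run, ans) (k, d) =
          ([k, d], if 3 ≤ run.length then ans ++ [run] else ans) := by
        unfold pvStep
        rw [if_neg]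
        intro hmatch
        have hfalse := hr k List.mem_cons_self
        simp only at hmatch hfalse
        rw [hfalse] at hmatch
        exact Bool.false_ne_true hmatch
      rw [hstep,
        run_extend k ds ([k, d]) (if 3 ≤ run.length then ans ++ [run] else ans) rfl]
      have hih := ih g (List.pairwise_cons.mp hks).2
        (fun k' hk' => hg k' (List.mem_cons_of_mem _ hk'))
        (k :: d :: ds) (if 3 ≤ run.length then ans ++ [run] else ans) ?hr'
      case hr' =>
        intro k' hk'
        have hlt := (List.pairwise_cons.mp hks).1 k' hk'
        have hne : k' ≠ k := ne_of_gt hlt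
        simpa using hne
      simp only [List.cons_append, List.nil_append] at hih ⊢
      rw [hih, List.map_cons, List.filter_cons, hgk]
      by_cases h3 : 3 ≤ (k :: d :: ds : List String).length
      · have h1 : 1 ≤ ds.length := by simpa using h3
        simp [h1, List.append_assoc]
      · have h1 : ¬ 1 ≤ ds.length := by simpa using h3
        simp [h1]

lemma B_eq (dishes : List (List String)) :
    tvGroupingDishes_alt dishes =
      ((pvKeys (pvRawPairs dishes)).map
          (fun k => k :: pvGroup (pvRawPairs dishes) k)).filter
        (fun l => decide (3 ≤ l.length)) := by
  show pvFinish ((PySem.List.sorted2 (pvRawPairs dishes) (fun p => p.1)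
      (fun p => p.2)).foldl pvStep ([], [])) = _
  rw [pvFlat_eq_sorted2]
  have hg : ∀ k ∈ pvKeys (pvRawPairs dishes), pvGroup (pvRawPairs dishes) k ≠ [] := by
    intro k hk
    unfold pvGroup
    rw [Ne, PySem.List.sorted_eq_nil_iff]
    unfold pvKeys at hk
    rw [PySem.List.mem_sorted, PySem.Set.mem_ofList] at hk
    rcases List.mem_map.mp hk with ⟨p, hp, rfl⟩
    unfold pvDishesOf
    intro hnil
    have hmem : p ∈ (pvRawPairs dishes).filter (fun q => q.1 == p.1) :=
      List.mem_filter.mpr ⟨hp, by simp⟩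
    rw [List.map_eq_nil_iff] at hnil
    rw [hnil] at hmem
    exact absurd hmem List.not_mem_nil
  have h := runScan (pvKeys (pvRawPairs dishes)) (pvGroup (pvRawPairs dishes))
    (pvKeys_pairwise_lt _) hg [] [] (fun k _ => rfl)
  unfold pvFlat pvFlatOf
  rw [h]
  simp

-- ===== VERDICT (by name: the statement is the Claim_ definition above) =====
theorem tvGroupingDishes_spec : Claim_equal_tvGroupingDishes := by
  intro dishes _ hpre
  unfold Spec_tvGroupingDishes
  rw [A_eq dishes hpre, B_eq dishes, List.filter_map]
  have hp : ∀ x ∈ pvKeys (pvRawPairs dishes),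
      ((fun l : List String => decide (3 ≤ l.length)) ∘
        (fun k => k :: pvGroup (pvRawPairs dishes) k)) x =
      (fun x => decide (2 ≤ (pvDishesOf (pvRawPairs dishes) x).length)) x := by
    intro x _
    simp only [Function.comp_apply, List.length_cons]
    unfold pvGroup
    simp only [PySem.List.length_sorted]
    exact decide_eq_decide.mpr (by omega)
  rw [List.filter_congr hp]
  exact List.map_congr_left (fun x _ => rfl)
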